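-- pv_equiv track=rewrite | github.com/21wh1a0501/CROSSWORD | root.py | across1
-- ===== SOURCE A (Python) =====
-- def across1(r, c, puzzle, copy):
--     across_clues = []
--     for i in range(r):
--         j = 0
--         while j < c:
--             if puzzle[i][j] == '*':
--                 j += 1
--                 continue
--             if j < c:
--                 clue_number = copy[i][j]
--                 clue_text = ''
--                 while j < c and puzzle[i][j] != '*':
--                     clue_text += puzzle[i][j]
--                     j += 1
--                 across_clues.append((clue_number, clue_text))
--     return across_clues
-- ===== SOURCE B (Python) =====
-- def across1(r, c, puzzle, copy):
--     clues = []
--     for i in range(r):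
--         # stage 1: word-start boundaries (non-star cell at column 0 or right after a star)
--         starts = [j for j in range(c)
--                   if puzzle[i][j] != '*' and (j == 0 or puzzle[i][j - 1] == '*')]
--         # stage 2: for each start, find the word's end and extract its text
--         for s in starts:
--             e = next((k for k in range(s, c) if puzzle[i][k] == '*'), c)
--             clues.append((copy[i][s], ''.join(puzzle[i][k] for k in range(s, e))))
--     return clues
-- ===== Notes on version B (the rewrite author's own statement) =====
-- stated objective: alternative
-- what changed: Replaces A's stateful two-pointer while/skip/continue scan with a staged decomposition: a comprehension first detects all word-start boundaries of a row, then each word is extracted independently by locating its ending star with next() and joining its cells.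
import Mathlib
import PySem

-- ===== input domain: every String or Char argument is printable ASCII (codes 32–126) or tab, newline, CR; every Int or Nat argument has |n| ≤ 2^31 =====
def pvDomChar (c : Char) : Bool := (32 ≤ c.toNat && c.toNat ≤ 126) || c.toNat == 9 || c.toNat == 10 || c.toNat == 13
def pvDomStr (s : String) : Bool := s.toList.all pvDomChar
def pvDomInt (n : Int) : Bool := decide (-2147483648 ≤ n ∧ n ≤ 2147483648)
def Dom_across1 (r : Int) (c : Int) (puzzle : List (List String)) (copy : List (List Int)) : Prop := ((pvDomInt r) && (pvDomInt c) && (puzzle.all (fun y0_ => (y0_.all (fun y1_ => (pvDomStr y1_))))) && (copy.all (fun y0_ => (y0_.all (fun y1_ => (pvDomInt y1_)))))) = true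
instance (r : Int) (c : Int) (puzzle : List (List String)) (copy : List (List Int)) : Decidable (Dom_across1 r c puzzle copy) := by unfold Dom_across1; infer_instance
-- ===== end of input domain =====

-- B replaces A's stateful two-pointer while/skip/continue scan with a staged decomposition:
-- detect all word-start boundaries of a row first, then extract each word independently
-- (objective: alternative decomposition, same cost).

-- ===== PORT A =====
-- inner while loop: while j < c and puzzle[i][j] != '*': text += puzzle[i][j]; j += 1
-- (indices are guaranteed in range by Pre_, so getD's default is never consulted on admitted inputs)
def across1Word (row : List String) (c : Nat) (j : Nat) (text : String) : String × Nat :=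
  if h : j < c ∧ ¬ row.getD j "" = "*" then
    across1Word row c (j+1) (text ++ row.getD j "")
  else (text, j)
termination_by c - j
decreasing_by omega

-- port-internal lemma needed for the termination of across1RowLoop
theorem across1Word_le (row : List String) (c j : Nat) (t : String) :
    j ≤ (across1Word row c j t).2 := by
  rw [across1Word]
  split
  · rename_i h
    exact Nat.le_of_succ_le (across1Word_le row c (j+1) (t ++ row.getD j ""))
  · exact Nat.le_refl j
termination_by c - j
decreasing_by omega

theorem across1Word_lt (row : List String) (c j : Nat) (t : String)
    (h1 : j < c) (h2 : ¬ row.getD j "" = "*") :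
    j < (across1Word row c j t).2 := by
  rw [across1Word, dif_pos ⟨h1, h2⟩]
  exact Nat.lt_of_lt_of_le (Nat.lt_succ_self j) (across1Word_le row c (j+1) _)

-- outer while loop over j (skip stars / read a word and append)
def across1RowLoop (row : List String) (crow : List Int) (c : Nat) (j : Nat)
    (acc : List (Int × String)) : List (Int × String) :=
  if h : j < c then
    if hs : row.getD j "" = "*" then
      across1RowLoop row crow c (j+1) acc
    else
      across1RowLoop row crow c (across1Word row c j "").2
        (acc ++ [(crow.getD j 0, (across1Word row c j "").1)])
  else acc
termination_by c - j
decreasing_by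
  · omega
  · have := across1Word_lt row c j "" h hs
    omega

def across1 (r : Int) (c : Int) (puzzle : List (List String)) (copy : List (List Int)) : List (Int × String) :=
  (List.range r.toNat).foldl
    (fun acc i => across1RowLoop (puzzle.getD i []) (copy.getD i []) c.toNat 0 acc) []

-- ===== PORT B =====
-- stage 1 predicate: puzzle[i][j] != '*' and (j == 0 or puzzle[i][j-1] == '*')
def altIsStart (row : List String) (j : Nat) : Bool :=
  row.getD j "" != "*" && (j == 0 || row.getD (j-1) "" == "*")

-- e = next((k for k in range(s, c) if puzzle[i][k] == '*'), c)
def altEnd (row : List String) (c s : Nat) : Nat :=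
  match (List.range' s (c - s)).find? (fun k => row.getD k "" == "*") with
  | some k => k
  | none => c

-- ''.join(puzzle[i][k] for k in range(s, e))
def altText (row : List String) (s e : Nat) : String :=
  PySem.Str.join "" ((List.range' s (e - s)).map (fun k => row.getD k ""))

def across1_alt (r : Int) (c : Int) (puzzle : List (List String)) (copy : List (List Int)) : List (Int × String) :=
  (List.range r.toNat).foldl
    (fun cl i =>
      cl ++ ((List.range c.toNat).filter (altIsStart (puzzle.getD i []))).map
        (fun s => ((copy.getD i []).getD s 0,
          altText (puzzle.getD i []) s (altEnd (puzzle.getD i []) c.toNat s)))) []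

-- ===== PRECONDITION & SPEC =====
-- Pre_ excludes exactly the inputs on which Python A raises IndexError: every cell
-- puzzle[i][j] with i < r, j < c is read, and copy[i][j] is read exactly at the start
-- of each word (a non-star cell at column 0 or preceded by a star).
def Pre_across1 (r : Int) (c : Int) (puzzle : List (List String)) (copy : List (List Int)) : Prop :=
  c.toNat = 0 ∨
  (r.toNat ≤ puzzle.length ∧
    ∀ i < r.toNat,
      c.toNat ≤ (puzzle.getD i []).length ∧
      ∀ j < c.toNat,
        ((¬ (puzzle.getD i []).getD j "" = "*" ∧
          (j = 0 ∨ (puzzle.getD i []).getD (j-1) "" = "*")) →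
          i < copy.length ∧ j < (copy.getD i []).length))
instance (r : Int) (c : Int) (puzzle : List (List String)) (copy : List (List Int)) : Decidable (Pre_across1 r c puzzle copy) := by unfold Pre_across1; infer_instance

def pvWitness_across1 : Int × Int × List (List String) × List (List Int) :=
  (2, 3, [["a", "b", "*"], ["*", "c", "d"]], [[1, 0, 0], [0, 2, 0]])

def Spec_across1 (r : Int) (c : Int) (puzzle : List (List String)) (copy : List (List Int)) (out : List (Int × String)) : Prop := out = across1_alt r c puzzle copy
instance (r : Int) (c : Int) (puzzle : List (List String)) (copy : List (List Int)) (out : List (Int × String)) : Decidable (Spec_across1 r c puzzle copy out) := by unfold Spec_across1; infer_instance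

-- ===== CLAIM (what is proved, stated in full; the proofs are below) =====
def Claim_equal_across1 : Prop := ∀ (r : Int) (c : Int) (puzzle : List (List String)) (copy : List (List Int)), Dom_across1 r c puzzle copy → Pre_across1 r c puzzle copy → Spec_across1 r c puzzle copy (across1 r c puzzle copy)

-- ===== LEMMAS AND PROOFS =====

theorem join_empty_cons (a : String) (l : List String) :
    PySem.Str.join "" (a :: l) = a ++ PySem.Str.join "" l := by
  have h : List.intercalate ([] : List Char) (a.toList :: l.map String.toList)
      = a.toList ++ List.intercalate [] (l.map String.toList) := by
    cases l <;> simp [List.intercalate]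
  simp [PySem.Str.join, PySem.Chars.join, h]

-- one-step unfolding of B's next(...) search
theorem altEnd_unfold (row : List String) (c j : Nat) :
    altEnd row c j =
      if j < c then (if row.getD j "" = "*" then j else altEnd row c (j+1)) else c := by
  unfold altEnd
  by_cases h : j < c
  · have e : c - j = (c - (j+1)) + 1 := by omega
    rw [if_pos h, e, List.range'_succ, List.find?]
    by_cases hs : row.getD j "" = "*"
    · have hs' : row[j]?.getD "" = "*" := by simpa [List.getD] using hs
      simp [hs']
    · have hs' : ¬ row[j]?.getD "" = "*" := by simpa [List.getD] using hs
      have hb : (row[j]?.getD "" == "*") = false := by simp [hs']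
      simp [hb]
      exact fun hx => absurd hx hs'
  · have e : c - j = 0 := by omega
    rw [if_neg h, e]
    simp

theorem altEnd_ge (row : List String) (c j : Nat) (hj : j ≤ c) : j ≤ altEnd row c j := by
  rw [altEnd_unfold]
  by_cases h : j < c
  · rw [if_pos h]
    by_cases hs : row.getD j "" = "*"
    · rw [if_pos hs]
    · rw [if_neg hs]
      exact Nat.le_of_succ_le (altEnd_ge row c (j+1) h)
  · rw [if_neg h]; omega
termination_by c - j
decreasing_by omega

theorem altEnd_le (row : List String) (c j : Nat) (hj : j ≤ c) : altEnd row c j ≤ c := by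
  rw [altEnd_unfold]
  by_cases h : j < c
  · rw [if_pos h]
    by_cases hs : row.getD j "" = "*"
    · rw [if_pos hs]; omega
    · rw [if_neg hs]
      exact altEnd_le row c (j+1) h
  · rw [if_neg h]
termination_by c - j
decreasing_by omega

theorem altEnd_no_star (row : List String) (c j k : Nat) (h1 : j ≤ k)
    (h2 : k < altEnd row c j) : ¬ row.getD k "" = "*" := by
  rw [altEnd_unfold] at h2
  by_cases h : j < c
  · rw [if_pos h] at h2
    by_cases hs : row.getD j "" = "*"
    · rw [if_pos hs] at h2; omega
    · rw [if_neg hs] at h2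
      rcases Nat.eq_or_lt_of_le h1 with rfl | hlt
      · exact hs
      · exact altEnd_no_star row c (j+1) k hlt h2
  · rw [if_neg h] at h2; omega
termination_by c - j
decreasing_by omega

theorem altEnd_star (row : List String) (c j : Nat) (h : altEnd row c j < c) :
    row.getD (altEnd row c j) "" = "*" := by
  rw [altEnd_unfold] at h ⊢
  by_cases hc : j < c
  · rw [if_pos hc] at h ⊢
    by_cases hs : row.getD j "" = "*"
    · rw [if_pos hs]; exact hs
    · rw [if_neg hs] at h ⊢
      exact altEnd_star row c (j+1) h
  · rw [if_neg hc] at h; omega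
termination_by c - j
decreasing_by omega

-- A's inner word loop computed by B's (end, join) decomposition
theorem word_eq (row : List String) (c j : Nat) (t : String) (hj : j ≤ c) :
    across1Word row c j t = (t ++ altText row j (altEnd row c j), altEnd row c j) := by
  rw [across1Word]
  by_cases h : j < c ∧ ¬ row.getD j "" = "*"
  · rw [dif_pos h]
    have he : altEnd row c j = altEnd row c (j+1) := by
      rw [altEnd_unfold, if_pos h.1, if_neg h.2]
    have hge : j + 1 ≤ altEnd row c (j+1) := altEnd_ge row c (j+1) h.1
    have htext : altText row j (altEnd row c (j+1))
        = row.getD j "" ++ altText row (j+1) (altEnd row c (j+1)) := by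
      unfold altText
      have e : altEnd row c (j+1) - j = (altEnd row c (j+1) - (j+1)) + 1 := by omega
      rw [e, List.range'_succ, List.map_cons, join_empty_cons]
    rw [word_eq row c (j+1) (t ++ row.getD j "") h.1, he, htext, String.append_assoc]
  · rw [dif_neg h]
    have he : altEnd row c j = j := by
      rw [altEnd_unfold]
      by_cases hc : j < c
      · have hs : row.getD j "" = "*" := by
          by_contra hne; exact h ⟨hc, hne⟩
        rw [if_pos hc, if_pos hs]
      · rw [if_neg hc]; omega
    have htext : altText row j j = "" := by
      unfold altText
      rw [Nat.sub_self]
      rfl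
    rw [he, htext, String.append_empty]
termination_by c - j
decreasing_by omega

-- columns strictly inside a word (or inside a skipped range of stars before a check point)
-- that are not starts can be dropped from the filter
theorem filter_skip (row : List String) (a b c : Nat) (hab : a ≤ b) (hbc : b ≤ c)
    (h : ∀ k, a ≤ k → k < b → altIsStart row k = false) :
    (List.range' a (c - a)).filter (altIsStart row)
      = (List.range' b (c - b)).filter (altIsStart row) := by
  rcases Nat.eq_or_lt_of_le hab with rfl | hlt
  · rfl
  · have e : c - a = (c - (a+1)) + 1 := by omega
    rw [e, List.range'_succ, List.filter_cons,
      if_neg (by simp [h a (Nat.le_refl a) hlt])]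
    exact filter_skip row (a+1) b c hlt hbc (fun k hk1 hk2 => h k (by omega) hk2)
termination_by b - a
decreasing_by omega

-- A's outer row loop from column j equals B's staged extraction over the remaining columns
theorem rowA (row : List String) (crow : List Int) (c j : Nat)
    (acc : List (Int × String)) (hj : j ≤ c)
    (hinv : j = c ∨ j = 0 ∨ row.getD (j-1) "" = "*" ∨ row.getD j "" = "*") :
    across1RowLoop row crow c j acc =
      acc ++ ((List.range' j (c - j)).filter (altIsStart row)).map
        (fun s => (crow.getD s 0, altText row s (altEnd row c s))) := by
  rw [across1RowLoop]
  by_cases h : j < c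
  · rw [dif_pos h]
    have e : c - j = (c - (j+1)) + 1 := by omega
    by_cases hs : row.getD j "" = "*"
    · rw [dif_pos hs]
      have hs' : row[j]?.getD "" = "*" := by simpa [List.getD] using hs
      rw [e, List.range'_succ, List.filter_cons, if_neg (by simp [altIsStart, hs'])]
      exact rowA row crow c (j+1) acc h (by right; right; left; simpa [List.getD] using hs)
    · rw [dif_neg hs]
      have hs' : ¬ row[j]?.getD "" = "*" := by simpa [List.getD] using hs
      have hstart : altIsStart row j = true := by
        rcases hinv with hc | h0 | hp | hst
        · omega
        · simp [altIsStart, h0]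
          exact h0 ▸ hs'
        · have hp' : row[j-1]?.getD "" = "*" := by simpa [List.getD] using hp
          simp [altIsStart, hs', hp']
        · exact absurd hst hs
      have hw := word_eq row c j "" (Nat.le_of_lt h)
      set en := altEnd row c j with hen
      have hge : j + 1 ≤ en := by
        rw [hen, altEnd_unfold, if_pos h, if_neg hs]
        exact altEnd_ge row c (j+1) h
      have hle : en ≤ c := altEnd_le row c j (Nat.le_of_lt h)
      have hfs : (List.range' (j+1) (c - (j+1))).filter (altIsStart row)
          = (List.range' en (c - en)).filter (altIsStart row) := by
        refine filter_skip row (j+1) en c hge hle ?_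
        intro k hk1 hk2
        have hprev : ¬ row.getD (k-1) "" = "*" :=
          altEnd_no_star row c j (k-1) (by omega) (by omega)
        have hprev' : ¬ row[k-1]?.getD "" = "*" := by simpa [List.getD] using hprev
        simp [altIsStart, hprev']
        omega
      have hinv' : en = c ∨ en = 0 ∨ row.getD (en-1) "" = "*" ∨ row.getD en "" = "*" := by
        by_cases hc : en < c
        · right; right; right; exact altEnd_star row c j hc
        · left; omega
      rw [hw]
      rw [rowA row crow c en (acc ++ [(crow.getD j 0, "" ++ altText row j en)]) hle hinv']
      rw [e, List.range'_succ, List.filter_cons, if_pos (by simpa using hstart),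
        List.map_cons, hfs]
      simp [hen]
  · rw [dif_neg h]
    have e : c - j = 0 := by omega
    rw [e]
    simp
termination_by c - j
decreasing_by all_goals omega

-- ===== VERDICT (by name: the statement is the Claim_ definition above) =====
theorem across1_spec : Claim_equal_across1 := by
  unfold Claim_equal_across1
  intro r c puzzle copy _hdom _hpre
  unfold Spec_across1 across1 across1_alt
  have hfun : (fun (acc : List (Int × String)) (i : Nat) =>
        across1RowLoop (puzzle.getD i []) (copy.getD i []) c.toNat 0 acc)
      = (fun (cl : List (Int × String)) (i : Nat) =>
        cl ++ ((List.range c.toNat).filter (altIsStart (puzzle.getD i []))).map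
          (fun s => ((copy.getD i []).getD s 0,
            altText (puzzle.getD i []) s (altEnd (puzzle.getD i []) c.toNat s)))) := by
    funext acc i
    have h := rowA (puzzle.getD i []) (copy.getD i []) c.toNat 0 acc (Nat.zero_le _)
      (Or.inr (Or.inl rfl))
    simpa [List.range_eq_range'] using h
  rw [hfun]
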